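-- pv_equiv track=rewrite | github.com/daridr1000/pythonOOP | venv/recursion.py | binary_maxmin
-- ===== SOURCE A (Python) =====
-- def binary_maxmin(S,start,stop):
--     if start >=stop:
--         return 0
--     elif start==stop-1:
--         return S[start]
--     else:
--         mid=(start+stop)//2
--         return max(binary_maxmin(S,mid,stop),binary_maxmin(S,start,mid))
-- ===== SOURCE B (Python) =====
-- def binary_maxmin(S, start, stop):
--     if start >= stop:
--         return 0
--     result = S[start]
--     for i in range(start + 1, stop):
--         if S[i] > result:
--             result = S[i]
--     return result
-- ===== Notes on version B (the rewrite author's own statement) =====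
-- stated objective: simpler
-- what changed: Replaces the divide-and-conquer recursion (halving the range and max-ing the two halves) with a single flat forward scan that keeps a running maximum, preserving the 0-for-empty-range behaviour.
import Mathlib
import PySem

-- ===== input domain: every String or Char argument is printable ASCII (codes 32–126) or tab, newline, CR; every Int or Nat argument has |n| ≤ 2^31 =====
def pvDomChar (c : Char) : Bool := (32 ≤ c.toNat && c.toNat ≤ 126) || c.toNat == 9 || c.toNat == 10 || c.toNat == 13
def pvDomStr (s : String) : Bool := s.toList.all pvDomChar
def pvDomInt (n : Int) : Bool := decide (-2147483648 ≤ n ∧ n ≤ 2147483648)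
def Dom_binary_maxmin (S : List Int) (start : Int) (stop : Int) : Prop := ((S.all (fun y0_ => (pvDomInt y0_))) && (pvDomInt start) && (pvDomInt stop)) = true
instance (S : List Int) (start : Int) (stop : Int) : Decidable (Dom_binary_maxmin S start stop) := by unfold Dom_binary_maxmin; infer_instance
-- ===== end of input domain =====

-- ===== PORT A =====
-- Python indexing S[start] raises outside Pre_; inside Pre_ every accessed index is
-- valid, so pyGetD with default 0 is exact there.
def binary_maxmin (S : List Int) (start : Int) (stop : Int) : Int :=
  if start ≥ stop then 0
  else if start = stop - 1 then PySem.List.pyGetD S start 0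
  else
    let mid := PySem.Int.floordiv (start + stop) 2
    max (binary_maxmin S mid stop) (binary_maxmin S start mid)
termination_by (stop - start).toNat
decreasing_by
  · have h : PySem.Int.floordiv (start + stop) 2 = (start + stop) / 2 :=
      PySem.Int.floordiv_eq_ediv_of_pos (by omega)
    omega
  · have h : PySem.Int.floordiv (start + stop) 2 = (start + stop) / 2 :=
      PySem.Int.floordiv_eq_ediv_of_pos (by omega)
    omega

-- ===== PORT B =====
def binary_maxmin_alt (S : List Int) (start : Int) (stop : Int) : Int :=
  if start ≥ stop then 0
  else
    (PySem.List.pyRange (start + 1) stop 1).foldl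
      (fun result i =>
        if PySem.List.pyGetD S i 0 > result then PySem.List.pyGetD S i 0 else result)
      (PySem.List.pyGetD S start 0)

-- ===== PRECONDITION & SPEC =====
-- Pre_ excludes exactly the inputs where Python A raises IndexError (some index in
-- [start, stop) outside Python's valid range for S).
def Pre_binary_maxmin (S : List Int) (start : Int) (stop : Int) : Prop :=
  start ≥ stop ∨ (-(S.length : Int) ≤ start ∧ stop ≤ (S.length : Int))
instance (S : List Int) (start : Int) (stop : Int) : Decidable (Pre_binary_maxmin S start stop) := by unfold Pre_binary_maxmin; infer_instance
def pvWitness_binary_maxmin : List Int × Int × Int := ([3, -1, 7, 2], 0, 4)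
def Spec_binary_maxmin (S : List Int) (start : Int) (stop : Int) (out : Int) : Prop := out = binary_maxmin_alt S start stop
instance (S : List Int) (start : Int) (stop : Int) (out : Int) : Decidable (Spec_binary_maxmin S start stop out) := by unfold Spec_binary_maxmin; infer_instance

-- ===== CLAIM (what is proved, stated in full; the proofs are below) =====
def Claim_equal_binary_maxmin : Prop := ∀ (S : List Int) (start : Int) (stop : Int), Dom_binary_maxmin S start stop → Pre_binary_maxmin S start stop → Spec_binary_maxmin S start stop (binary_maxmin S start stop)

-- ===== LEMMAS AND PROOFS =====

-- B's loop step is just `max` on Int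
lemma step_eq_max (S : List Int) :
    (fun result i =>
      if PySem.List.pyGetD S i 0 > result then PySem.List.pyGetD S i 0 else result)
    = fun (result i : Int) => max result (PySem.List.pyGetD S i 0) := by
  funext r i
  rcases le_or_gt (PySem.List.pyGetD S i 0) r with h | h
  · simp [not_lt.mpr h, max_eq_left h]
  · simp [h, max_eq_right h.le]

-- pulling a `max` out of a running-maximum foldl
lemma foldl_max_init (g : Int → Int) (l : List Int) :
    ∀ x y, List.foldl (fun r i => max r (g i)) (max x y) l
      = max x (List.foldl (fun r i => max r (g i)) y l) := by
  induction l with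
  | nil => intro x y; rfl
  | cons a l ih =>
    intro x y
    simp only [List.foldl_cons, max_assoc]
    exact ih x (max y (g a))

-- A computes the running maximum of the values at indices [start, stop)
lemma binary_maxmin_scan (S : List Int) :
    ∀ (n : Nat) (a b : Int), (b - a).toNat = n → a < b →
      binary_maxmin S a b
        = List.foldl (fun r i => max r (PySem.List.pyGetD S i 0))
            (PySem.List.pyGetD S a 0) (PySem.List.pyRange (a + 1) b 1) := by
  intro n
  induction n using Nat.strong_induction_on with
  | _ n ih =>
    intro a b hn hab
    rcases eq_or_lt_of_le (by omega : a + 1 ≤ b) with hone | htwo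
    · -- singleton range
      rw [binary_maxmin]
      rw [if_neg (by omega), if_pos (show a = b - 1 by omega)]
      have hnil : PySem.List.pyRange (a + 1) b 1 = [] := by
        apply List.eq_nil_iff_forall_not_mem.mpr
        intro x hx
        rw [PySem.List.mem_pyRange_one] at hx
        omega
      rw [hnil]; rfl
    · -- gap ≥ 2: split at mid
      rw [binary_maxmin]
      have hm : PySem.Int.floordiv (a + b) 2 = (a + b) / 2 :=
        PySem.Int.floordiv_eq_ediv_of_pos (by omega)
      set m := PySem.Int.floordiv (a + b) 2 with hmdef
      have hm1 : a < m := by omega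
      have hm2 : m < b := by omega
      have hA1 : binary_maxmin S m b
          = List.foldl (fun r i => max r (PySem.List.pyGetD S i 0))
              (PySem.List.pyGetD S m 0) (PySem.List.pyRange (m + 1) b 1) :=
        ih (b - m).toNat (by omega) m b rfl hm2
      have hA2 : binary_maxmin S a m
          = List.foldl (fun r i => max r (PySem.List.pyGetD S i 0))
              (PySem.List.pyGetD S a 0) (PySem.List.pyRange (a + 1) m 1) :=
        ih (m - a).toNat (by omega) a m rfl hm1
      have hsplit : PySem.List.pyRange (a + 1) b 1
          = PySem.List.pyRange (a + 1) m 1 ++ PySem.List.pyRange m b 1 :=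
        PySem.List.pyRange_one_append (a + 1) m b (by omega) (by omega)
      have hcons : PySem.List.pyRange m b 1 = m :: PySem.List.pyRange (m + 1) b 1 :=
        PySem.List.pyRange_one_cons hm2
      simp only [not_le.mpr hab, if_false, if_neg (show ¬ a = b - 1 by omega)]
      rw [hA1, hA2, hsplit, hcons, List.foldl_append, List.foldl_cons,
        foldl_max_init, max_comm]

-- ===== VERDICT (by name: the statement is the Claim_ definition above) =====
theorem binary_maxmin_spec : Claim_equal_binary_maxmin := by
  intro S start stop _ _
  unfold Spec_binary_maxmin binary_maxmin_alt
  rcases le_or_gt stop start with h | h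
  · rw [binary_maxmin]; simp [h]
  · rw [if_neg (not_le.mpr h), step_eq_max S]
    exact binary_maxmin_scan S (stop - start).toNat start stop rfl h
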